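-- pv_equiv track=rewrite | github.com/sbrunomello/pce-python-engine | agents/rover/world/sensors.py | distance_to_block
-- ===== SOURCE A (Python) =====
-- Coord = tuple[int, int]
--
-- DIR_TO_VEC: dict[int, Coord] = {
--     0: (0, -1),
--     1: (1, 0),
--     2: (0, 1),
--     3: (-1, 0),
-- }
--
-- def distance_to_block(
--     origin: Coord,
--     direction: int,
--     width: int,
--     height: int,
--     obstacles: set[Coord],
--     max_range: int = 10,
-- ) -> int:
--     """Return free tiles count until a collision with wall/obstacle."""
--     dx, dy = DIR_TO_VEC[direction]
--     x, y = origin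
--     for distance in range(1, max_range + 1):
--         nx, ny = x + dx * distance, y + dy * distance
--         if nx < 0 or ny < 0 or nx >= width or ny >= height or (nx, ny) in obstacles:
--             return distance - 1
--     return max_range
-- ===== SOURCE B (Python) =====
-- DIR_TO_VEC = {
--     0: (0, -1),
--     1: (1, 0),
--     2: (0, 1),
--     3: (-1, 0),
-- }
--
-- def distance_to_block(origin, direction, width, height, obstacles, max_range=10):
--     """Closed-form wall distance plus one pass over the obstacles on the ray."""
--     dx, dy = DIR_TO_VEC[direction]
--     x, y = origin
--     if not (0 <= x + dx < width and 0 <= y + dy < height):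
--         wall = 0  # even the first step leaves the board
--     elif dx > 0:
--         wall = width - 1 - x
--     elif dx < 0:
--         wall = x
--     elif dy > 0:
--         wall = height - 1 - y
--     else:
--         wall = y
--     best = min(wall, max_range)
--     for ox, oy in obstacles:
--         if dy == 0 and oy == y:
--             d = (ox - x) * dx
--         elif dx == 0 and ox == x:
--             d = (oy - y) * dy
--         else:
--             continue
--         if 1 <= d and d - 1 < best:
--             best = d - 1
--     return best
-- ===== Notes on version B (the rewrite author's own statement) =====
-- stated objective: faster
-- what changed: Replaces the step-by-step ray-marching loop over range(1, max_range+1) with a closed-form wall distance (0 if the first step already leaves the board, else the distance to the far edge along the heading) plus a single pass over the obstacle set keeping the minimal on-ray obstacle distance; Pre_ excludes only directions outside 0..3, on which A raises KeyError.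
import Mathlib
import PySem

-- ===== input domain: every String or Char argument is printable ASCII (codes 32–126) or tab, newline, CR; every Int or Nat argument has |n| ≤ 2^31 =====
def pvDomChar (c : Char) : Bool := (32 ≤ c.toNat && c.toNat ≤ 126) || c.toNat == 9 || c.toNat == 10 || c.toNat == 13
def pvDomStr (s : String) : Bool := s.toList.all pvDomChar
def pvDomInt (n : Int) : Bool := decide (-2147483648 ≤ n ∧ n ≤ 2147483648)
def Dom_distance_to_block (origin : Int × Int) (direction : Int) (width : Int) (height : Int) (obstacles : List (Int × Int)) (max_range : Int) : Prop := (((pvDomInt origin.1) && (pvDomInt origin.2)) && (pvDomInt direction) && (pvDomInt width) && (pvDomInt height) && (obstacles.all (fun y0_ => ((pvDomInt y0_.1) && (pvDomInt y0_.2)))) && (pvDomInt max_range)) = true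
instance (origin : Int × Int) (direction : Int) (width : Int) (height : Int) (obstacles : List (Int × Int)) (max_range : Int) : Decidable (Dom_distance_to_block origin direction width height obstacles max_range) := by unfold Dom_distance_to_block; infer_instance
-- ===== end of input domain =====

-- B replaces A's step-by-step ray march with a closed-form wall distance plus one pass
-- over the obstacle set (objective: a faster, loop-free wall computation).

-- ===== PORT A =====
def DIR_TO_VEC : PySem.Dict Int (Int × Int) :=
  PySem.Dict.ofList [(0, (0, -1)), (1, (1, 0)), (2, (0, 1)), (3, (-1, 0))]

-- the 'for distance in range(1, max_range+1)' loop with its early return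
def pvLoopA (x y dx dy width height : Int) (obs : List (Int × Int)) (mr : Int) : List Int → Int
  | [] => mr
  | d :: rest =>
      let nx := x + dx * d
      let ny := y + dy * d
      if nx < 0 ∨ ny < 0 ∨ nx ≥ width ∨ ny ≥ height ∨ (nx, ny) ∈ obs then d - 1
      else pvLoopA x y dx dy width height obs mr rest

def distance_to_block (origin : Int × Int) (direction : Int) (width : Int) (height : Int) (obstacles : List (Int × Int)) (max_range : Int) : Int :=
  -- DIR_TO_VEC[direction] raises KeyError for direction ∉ {0,1,2,3}; those inputs are
  -- outside Pre_, the default (0,0) is never used under Pre_.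
  let dv := PySem.Dict.getD DIR_TO_VEC direction (0, 0)
  pvLoopA origin.1 origin.2 dv.1 dv.2 width height obstacles max_range
    (PySem.List.pyRange 1 (max_range + 1) 1)

-- ===== PORT B =====
def pvDIR_TO_VEC_B : PySem.Dict Int (Int × Int) :=
  PySem.Dict.ofList [(0, (0, -1)), (1, (1, 0)), (2, (0, 1)), (3, (-1, 0))]

-- wall distance: 0 if even the first step leaves the board, else the distance
-- to the far edge along the heading
def pvWallFree (x y dx dy width height : Int) : Int :=
  if ¬ (0 ≤ x + dx ∧ x + dx < width ∧ 0 ≤ y + dy ∧ y + dy < height) then 0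
  else if dx > 0 then width - 1 - x
  else if dx < 0 then x
  else if dy > 0 then height - 1 - y
  else y

-- body of the 'for ox, oy in obstacles' loop
def pvObsStep (x y dx dy : Int) (best : Int) (o : Int × Int) : Int :=
  if dy = 0 ∧ o.2 = y then
    (if 1 ≤ (o.1 - x) * dx ∧ (o.1 - x) * dx - 1 < best then (o.1 - x) * dx - 1 else best)
  else if dx = 0 ∧ o.1 = x then
    (if 1 ≤ (o.2 - y) * dy ∧ (o.2 - y) * dy - 1 < best then (o.2 - y) * dy - 1 else best)
  else best

def distance_to_block_alt (origin : Int × Int) (direction : Int) (width : Int) (height : Int) (obstacles : List (Int × Int)) (max_range : Int) : Int :=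
  -- same KeyError note as in port A; default (0,0) never used under Pre_
  let dv := PySem.Dict.getD pvDIR_TO_VEC_B direction (0, 0)
  obstacles.foldl (pvObsStep origin.1 origin.2 dv.1 dv.2)
    (min (pvWallFree origin.1 origin.2 dv.1 dv.2 width height) max_range)

-- ===== PRECONDITION & SPEC =====
-- Pre_ excludes exactly the directions outside {0,1,2,3}, on which Python A raises KeyError.
def Pre_distance_to_block (origin : Int × Int) (direction : Int) (width : Int) (height : Int) (obstacles : List (Int × Int)) (max_range : Int) : Prop :=
  direction = 0 ∨ direction = 1 ∨ direction = 2 ∨ direction = 3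
instance (origin : Int × Int) (direction : Int) (width : Int) (height : Int) (obstacles : List (Int × Int)) (max_range : Int) : Decidable (Pre_distance_to_block origin direction width height obstacles max_range) := by unfold Pre_distance_to_block; infer_instance

def pvWitness_distance_to_block : (Int × Int) × Int × Int × Int × (List (Int × Int)) × Int :=
  ((0, 0), 1, 5, 5, [(3, 0)], 10)

def Spec_distance_to_block (origin : Int × Int) (direction : Int) (width : Int) (height : Int) (obstacles : List (Int × Int)) (max_range : Int) (out : Int) : Prop := out = distance_to_block_alt origin direction width height obstacles max_range
instance (origin : Int × Int) (direction : Int) (width : Int) (height : Int) (obstacles : List (Int × Int)) (max_range : Int) (out : Int) : Decidable (Spec_distance_to_block origin direction width height obstacles max_range out) := by unfold Spec_distance_to_block; infer_instance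

-- ===== CLAIM (what is proved, stated in full; the proofs are below) =====
def Claim_equal_distance_to_block : Prop := ∀ (origin : Int × Int) (direction : Int) (width : Int) (height : Int) (obstacles : List (Int × Int)) (max_range : Int), Dom_distance_to_block origin direction width height obstacles max_range → Pre_distance_to_block origin direction width height obstacles max_range → Spec_distance_to_block origin direction width height obstacles max_range (distance_to_block origin direction width height obstacles max_range)

-- ===== LEMMAS AND PROOFS =====

-- the blocking condition of A's loop, as a named predicate
def pvBlocked (x y dx dy width height : Int) (obs : List (Int × Int)) (d : Int) : Prop :=
  x + dx * d < 0 ∨ y + dy * d < 0 ∨ x + dx * d ≥ width ∨ y + dy * d ≥ height ∨ (x + dx * d, y + dy * d) ∈ obs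

-- the out-of-bounds part alone
def pvOut (x y dx dy width height : Int) (d : Int) : Prop :=
  x + dx * d < 0 ∨ y + dy * d < 0 ∨ x + dx * d ≥ width ∨ y + dy * d ≥ height

-- candidate step distance contributed by an obstacle in B's pass
def pvCand (x y dx dy : Int) (o : Int × Int) : Option Int :=
  if dy = 0 ∧ o.2 = y then some ((o.1 - x) * dx)
  else if dx = 0 ∧ o.1 = x then some ((o.2 - y) * dy)
  else none

def pvDirOK (dx dy : Int) : Prop :=
  (dx, dy) = (0, -1) ∨ (dx, dy) = (1, 0) ∨ (dx, dy) = (0, 1) ∨ (dx, dy) = (-1, 0)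

lemma pvLoopA_cons (x y dx dy width height : Int) (obs : List (Int × Int)) (mr d : Int) (rest : List Int) :
    pvLoopA x y dx dy width height obs mr (d :: rest) =
      if x + dx * d < 0 ∨ y + dy * d < 0 ∨ x + dx * d ≥ width ∨ y + dy * d ≥ height ∨ (x + dx * d, y + dy * d) ∈ obs then d - 1
      else pvLoopA x y dx dy width height obs mr rest := rfl

lemma pvWallFree_nonneg (x y dx dy width height : Int) : 0 ≤ pvWallFree x y dx dy width height := by
  unfold pvWallFree; split_ifs <;> omega

lemma pvWallFree_free (x y dx dy width height : Int) (h : pvDirOK dx dy) (d : Int)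
    (h1 : 1 ≤ d) (h2 : d ≤ pvWallFree x y dx dy width height) :
    ¬ pvOut x y dx dy width height d := by
  rcases h with h | h | h | h <;>
    (obtain ⟨hx, hy⟩ := Prod.mk.injEq .. ▸ h; subst hx; subst hy) <;>
    (unfold pvWallFree at h2; unfold pvOut) <;>
    simp only [zero_mul, one_mul, neg_mul] at * <;>
    (split_ifs at h2 <;> omega)

lemma pvWallFree_out (x y dx dy width height : Int) (h : pvDirOK dx dy) :
    pvOut x y dx dy width height (pvWallFree x y dx dy width height + 1) := by
  rcases h with h | h | h | h <;>
    (obtain ⟨hx, hy⟩ := Prod.mk.injEq .. ▸ h; subst hx; subst hy) <;>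
    (unfold pvWallFree pvOut) <;>
    simp only [zero_mul, one_mul, neg_mul] <;>
    (split_ifs <;> omega)

-- the step of B's fold, expressed through pvCand
lemma pvObsStep_eq (x y dx dy best : Int) (o : Int × Int) :
    pvObsStep x y dx dy best o =
      (pvCand x y dx dy o).elim best
        (fun dd => if 1 ≤ dd ∧ dd - 1 < best then dd - 1 else best) := by
  unfold pvObsStep pvCand
  by_cases h1 : dy = 0 ∧ o.2 = y
  · simp only [if_pos h1, Option.elim_some]
  · by_cases h2 : dx = 0 ∧ o.1 = x
    · simp only [if_neg h1, if_pos h2, Option.elim_some]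
    · simp only [if_neg h1, if_neg h2, Option.elim_none]

-- fold characterization, part 1: the accumulator never increases
lemma pvFold_le (x y dx dy : Int) (l : List (Int × Int)) (b0 : Int) :
    l.foldl (pvObsStep x y dx dy) b0 ≤ b0 := by
  induction l generalizing b0 with
  | nil => simp
  | cons o rest ih =>
      simp only [List.foldl_cons]
      refine le_trans (ih _) ?_
      rw [pvObsStep_eq]
      cases hc : pvCand x y dx dy o with
      | none => simp
      | some dd => simp only [Option.elim_some]; split_ifs <;> omega

-- part 2: the result is ≤ every valid obstacle candidate
lemma pvFold_le_cand (x y dx dy : Int) (l : List (Int × Int)) (b0 : Int)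
    (o : Int × Int) (ho : o ∈ l) (dd : Int) (hc : pvCand x y dx dy o = some dd) (h1 : 1 ≤ dd) :
    l.foldl (pvObsStep x y dx dy) b0 ≤ dd - 1 := by
  induction l generalizing b0 with
  | nil => cases ho
  | cons p rest ih =>
      simp only [List.foldl_cons]
      rcases List.mem_cons.mp ho with rfl | hmem
      · refine le_trans (pvFold_le _ _ _ _ _ _) ?_
        rw [pvObsStep_eq, hc]
        simp only [Option.elim_some]; split_ifs <;> omega
      · exact ih _ hmem

-- part 3: the result is the start value or a valid obstacle candidate minus one
lemma pvFold_cases (x y dx dy : Int) (l : List (Int × Int)) (b0 : Int) :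
    l.foldl (pvObsStep x y dx dy) b0 = b0 ∨
      ∃ o ∈ l, ∃ dd, pvCand x y dx dy o = some dd ∧ 1 ≤ dd ∧
        l.foldl (pvObsStep x y dx dy) b0 = dd - 1 := by
  induction l generalizing b0 with
  | nil => left; rfl
  | cons o rest ih =>
      simp only [List.foldl_cons]
      rcases ih (pvObsStep x y dx dy b0 o) with h | ⟨p, hp, dd, hc, h1, he⟩
      · rw [h, pvObsStep_eq]
        cases hco : pvCand x y dx dy o with
        | none => left; simp
        | some dd =>
            simp only [Option.elim_some]
            split_ifs with hif
            · right; exact ⟨o, List.mem_cons_self, dd, hco, hif.1, rfl⟩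
            · left; rfl
      · right; exact ⟨p, List.mem_cons_of_mem _ hp, dd, hc, h1, he⟩

-- obstacle-hit ↔ candidate correspondence, forward
lemma pvCand_of_hit (x y dx dy : Int) (h : pvDirOK dx dy) (obs : List (Int × Int)) (d : Int)
    (hm : (x + dx * d, y + dy * d) ∈ obs) :
    ∃ o ∈ obs, pvCand x y dx dy o = some d := by
  refine ⟨_, hm, ?_⟩
  rcases h with h | h | h | h <;>
    (obtain ⟨hx, hy⟩ := Prod.mk.injEq .. ▸ h; subst hx; subst hy) <;>
    (unfold pvCand; norm_num)

-- and backward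
lemma pvHit_of_cand (x y dx dy : Int) (h : pvDirOK dx dy) (o : Int × Int) (d : Int)
    (hc : pvCand x y dx dy o = some d) :
    o = (x + dx * d, y + dy * d) := by
  rcases h with h | h | h | h <;>
    (obtain ⟨hx, hy⟩ := Prod.mk.injEq .. ▸ h; subst hx; subst hy) <;>
    (unfold pvCand at hc; norm_num at hc) <;>
    (obtain ⟨h2, h1⟩ := hc; exact Prod.ext (by omega) (by omega))

-- A's march over pyRange s (mr+1) equals any R with the first-blocked characterization
lemma pvLoopA_eq_aux (x y dx dy width height : Int) (obs : List (Int × Int)) (mr R : Int)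
    (hsome : ∀ d, 1 ≤ d → d ≤ mr → pvBlocked x y dx dy width height obs d →
      (∀ d', 1 ≤ d' → d' < d → ¬ pvBlocked x y dx dy width height obs d') → R = d - 1)
    (hnone : (∀ d, 1 ≤ d → d ≤ mr → ¬ pvBlocked x y dx dy width height obs d) → R = mr) :
    ∀ (n : Nat) (s : Int), 1 ≤ s → (mr + 1 - s).toNat ≤ n →
      (∀ d', 1 ≤ d' → d' < s → ¬ pvBlocked x y dx dy width height obs d') →
      pvLoopA x y dx dy width height obs mr (PySem.List.pyRange s (mr + 1) 1) = R := by
  intro n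
  induction n with
  | zero =>
      intro s hs hn hmin
      have hse : mr + 1 ≤ s := by omega
      rw [PySem.List.pyRange_one_eq_nil hse]
      show mr = R
      exact (hnone (fun d h1 h2 => hmin d h1 (by omega))).symm
  | succ n ih =>
      intro s hs hn hmin
      by_cases hse : mr + 1 ≤ s
      · rw [PySem.List.pyRange_one_eq_nil hse]
        exact (hnone (fun d h1 h2 => hmin d h1 (by omega))).symm
      · rw [PySem.List.pyRange_one_cons (by omega), pvLoopA_cons]
        split_ifs with hb
        · exact (hsome s hs (by omega) hb hmin).symm
        · exact ih (s + 1) (by omega) (by omega)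
            (fun d' h1 h2 => by
              rcases eq_or_lt_of_le (by omega : d' ≤ s) with rfl | hlt
              · exact hb
              · exact hmin d' h1 hlt)

-- the core equality for a valid direction vector
lemma pvCore (x y dx dy width height : Int) (obs : List (Int × Int)) (mr : Int)
    (h : pvDirOK dx dy) :
    pvLoopA x y dx dy width height obs mr (PySem.List.pyRange 1 (mr + 1) 1) =
      obs.foldl (pvObsStep x y dx dy) (min (pvWallFree x y dx dy width height) mr) := by
  set wall := pvWallFree x y dx dy width height with hwall
  set R := obs.foldl (pvObsStep x y dx dy) (min wall mr) with hR
  have hw0 : 0 ≤ wall := pvWallFree_nonneg x y dx dy width height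
  have hRb : R ≤ min wall mr := pvFold_le x y dx dy obs (min wall mr)
  refine pvLoopA_eq_aux x y dx dy width height obs mr R ?_ ?_ (mr + 1 - 1).toNat 1 le_rfl le_rfl
    (fun d' h1 h2 => absurd (lt_of_lt_of_le h2 h1) (lt_irrefl _))
  · -- first blocked distance d: R = d - 1
    intro d h1 h2 hb hminimal
    have hdw : d - 1 ≤ wall := by
      by_contra hcon
      have hblocked : pvBlocked x y dx dy width height obs (wall + 1) :=
        Or.elim (pvWallFree_out x y dx dy width height h)
          (fun h => Or.inl h) (fun h => Or.elim h (fun h => Or.inr (Or.inl h))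
          (fun h => Or.elim h (fun h => Or.inr (Or.inr (Or.inl h)))
          (fun h => Or.inr (Or.inr (Or.inr (Or.inl h))))))
      exact hminimal (wall + 1) (by omega) (by omega) hblocked
    refine le_antisymm ?_ ?_
    · -- R ≤ d - 1
      rcases hb with hout | hout | hout | hout | hhit
      · have : ¬ (d ≤ wall) := fun hle =>
          pvWallFree_free x y dx dy width height h d h1 hle (Or.inl hout)
        calc R ≤ min wall mr := hRb
          _ ≤ wall := min_le_left _ _
          _ ≤ d - 1 := by omega
      · have : ¬ (d ≤ wall) := fun hle =>
          pvWallFree_free x y dx dy width height h d h1 hle (Or.inr (Or.inl hout))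
        calc R ≤ min wall mr := hRb
          _ ≤ wall := min_le_left _ _
          _ ≤ d - 1 := by omega
      · have : ¬ (d ≤ wall) := fun hle =>
          pvWallFree_free x y dx dy width height h d h1 hle (Or.inr (Or.inr (Or.inl hout)))
        calc R ≤ min wall mr := hRb
          _ ≤ wall := min_le_left _ _
          _ ≤ d - 1 := by omega
      · have : ¬ (d ≤ wall) := fun hle =>
          pvWallFree_free x y dx dy width height h d h1 hle (Or.inr (Or.inr (Or.inr hout)))
        calc R ≤ min wall mr := hRb
          _ ≤ wall := min_le_left _ _
          _ ≤ d - 1 := by omega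
      · obtain ⟨o, ho, hc⟩ := pvCand_of_hit x y dx dy h obs d hhit
        exact pvFold_le_cand x y dx dy obs (min wall mr) o ho d hc h1
    · -- d - 1 ≤ R
      rcases pvFold_cases x y dx dy obs (min wall mr) with he | ⟨o, ho, dd, hc, hd1, he⟩
      · rw [← hR] at he; rw [he]; simp only [le_min_iff]; omega
      · rw [← hR] at he; rw [he]
        have hoeq := pvHit_of_cand x y dx dy h o dd hc
        have hbdd : pvBlocked x y dx dy width height obs dd :=
          Or.inr (Or.inr (Or.inr (Or.inr (hoeq ▸ ho))))
        by_contra hcon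
        exact hminimal dd hd1 (by omega) hbdd
  · -- no blocked distance in [1, mr]: R = mr
    intro hfree
    have hwm : mr ≤ wall := by
      by_contra hcon
      have hblocked : pvBlocked x y dx dy width height obs (wall + 1) :=
        Or.elim (pvWallFree_out x y dx dy width height h)
          (fun h => Or.inl h) (fun h => Or.elim h (fun h => Or.inr (Or.inl h))
          (fun h => Or.elim h (fun h => Or.inr (Or.inr (Or.inl h)))
          (fun h => Or.inr (Or.inr (Or.inr (Or.inl h))))))
      exact hfree (wall + 1) (by omega) (by omega) hblocked
    refine le_antisymm (le_trans hRb (min_le_right _ _)) ?_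
    rcases pvFold_cases x y dx dy obs (min wall mr) with he | ⟨o, ho, dd, hc, hd1, he⟩
    · rw [← hR] at he; rw [he]; simp only [le_min_iff]; omega
    · rw [← hR] at he; rw [he]
      have hoeq := pvHit_of_cand x y dx dy h o dd hc
      have hbdd : pvBlocked x y dx dy width height obs dd :=
        Or.inr (Or.inr (Or.inr (Or.inr (hoeq ▸ ho))))
      by_contra hcon
      exact hfree dd hd1 (by omega) hbdd

lemma pvDicts_eq : pvDIR_TO_VEC_B = DIR_TO_VEC := by decide

-- ===== VERDICT (by name: the statement is the Claim_ definition above) =====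
theorem distance_to_block_spec : Claim_equal_distance_to_block := by
  intro origin direction width height obstacles max_range _hdom hpre
  show distance_to_block origin direction width height obstacles max_range =
    distance_to_block_alt origin direction width height obstacles max_range
  unfold distance_to_block distance_to_block_alt
  rw [pvDicts_eq]
  have hdir : pvDirOK (PySem.Dict.getD DIR_TO_VEC direction (0, 0)).1
      (PySem.Dict.getD DIR_TO_VEC direction (0, 0)).2 := by
    rcases hpre with rfl | rfl | rfl | rfl
    · left; rfl
    · right; left; rfl
    · right; right; left; rfl
    · right; right; right; rfl
  exact pvCore origin.1 origin.2 _ _ width height obstacles max_range hdir
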